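-- pv_equiv track=rewrite | github.com/oskkos/AOC2023 | src/day15.py | part_two
-- ===== SOURCE A (Python) =====
-- from typing import NewType, TypedDict
--
-- Box = TypedDict("Box", {"label": str, "len": int})
--
-- def part_two(lines: list[str]) -> int:
--     """
--     Calculates the result for part two of the problem.
--
--     Args:
--         lines (list[str]): The input lines.
--
--     Returns:
--         int: The result for part two.
--     """
--     boxes: dict[int, list[Box]] = {}
--     for i in range(256):
--         boxes[i] = []
--
--     for line in lines:
--         chunks = line.split(",")
--         for chunk in chunks:
--             splitter = "=" if chunk.find("=") != -1 else "-"
--             label = chunk[: chunk.find(splitter)]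
--             box_nbr = get_chunk_val(label)
--
--             if splitter == "=":
--                 focal_len = int(chunk[chunk.find(splitter) + 1 :])
--                 handle_add_to_box(boxes, box_nbr, label, focal_len)
--             elif splitter == "-":
--                 handle_remove_from_box(boxes, box_nbr, label)
--
--     total = 0
--     for box_nbr, lenses in boxes.items():
--         for i, lens in enumerate(lenses):
--             lenses_in_box_sum = int(box_nbr + 1) * (i + 1) * lens["len"]
--             total += lenses_in_box_sum
--
--     return total
--
-- def handle_add_to_box(
--     boxes: dict[int, list[Box]], box: int, label: str, focal_len: int
-- ) -> None:
--     """
--     Add or update a label with its focal length to a specific box.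
--
--     Args:
--         boxes (list): The list of boxes.
--         box (int): The index of the box to add/update the label in.
--         label (str): The label to add/update.
--         focal_len (int): The focal length to associate with the label.
--
--     Returns:
--         None
--     """
--     labels = boxes[box]
--     replace = False
--     for label_dict in labels:
--         if label_dict["label"] == label:
--             label_dict["len"] = focal_len
--             replace = True
--             break
--     if not replace:
--         boxes[box].append({"label": label, "len": focal_len})
--
-- def handle_remove_from_box(boxes: dict[int, list[Box]], box: int, label: str) -> None:
--     """
--     Remove a label from a box.
--
--     Args:
--         boxes (dict): A dictionary containing boxes and their labels.
--         box (str): The box from which the label should be removed.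
--         label (str): The label to be removed.
--
--     Returns:
--         None
--     """
--     labels = boxes[box]
--     for label_dict in labels:
--         if label_dict["label"] == label:
--             labels.remove(label_dict)
--             break
--
-- def get_chunk_val(chunk: str) -> int:
--     """
--     Get the value of a chunk.
--
--     Returns:
--         int: The value of the chunk.
--     """
--     chunk_val = 0
--     for char in chunk:
--         ascii_code = ord(char)
--         chunk_val += ascii_code
--         chunk_val *= 17
--         chunk_val %= 256
--     return chunk_val
-- ===== SOURCE B (Python) =====
-- def get_chunk_val(chunk: str) -> int:
--     """HASH value of a label (same helper as in A)."""
--     chunk_val = 0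
--     for char in chunk:
--         ascii_code = ord(char)
--         chunk_val += ascii_code
--         chunk_val *= 17
--         chunk_val %= 256
--     return chunk_val
--
--
-- def part_two(lines: list[str]) -> int:
--     """Single insertion-ordered dict keyed by label instead of 256 lens lists;
--     per-box order = insertion order restricted to that box's labels."""
--     lenses: dict[str, int] = {}
--     for line in lines:
--         for chunk in line.split(","):
--             eq = chunk.find("=")
--             if eq != -1:
--                 lenses[chunk[:eq]] = int(chunk[eq + 1:])
--             else:
--                 lenses.pop(chunk[: chunk.find("-")], None)
--
--     total = 0
--     slot: dict[int, int] = {}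
--     for label, focal in lenses.items():
--         box = get_chunk_val(label)
--         i = slot.get(box, 0) + 1
--         slot[box] = i
--         total += (box + 1) * i * focal
--     return total
-- ===== Notes on version B (the rewrite author's own statement) =====
-- stated objective: faster
-- what changed: A keeps 256 per-box lists and scans a box's list on every add/remove; B keeps one insertion-ordered dict keyed by label (O(1) add/remove/overwrite) and scores it in a single pass with per-box slot counters.
import Mathlib
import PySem

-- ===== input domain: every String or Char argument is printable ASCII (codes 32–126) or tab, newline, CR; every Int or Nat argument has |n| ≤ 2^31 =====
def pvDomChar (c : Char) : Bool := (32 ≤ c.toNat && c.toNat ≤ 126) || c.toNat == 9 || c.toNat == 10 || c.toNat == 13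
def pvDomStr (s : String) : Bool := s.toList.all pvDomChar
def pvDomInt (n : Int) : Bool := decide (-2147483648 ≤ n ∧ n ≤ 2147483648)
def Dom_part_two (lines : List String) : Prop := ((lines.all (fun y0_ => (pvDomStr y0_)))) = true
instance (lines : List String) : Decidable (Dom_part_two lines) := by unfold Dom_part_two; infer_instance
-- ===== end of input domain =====

-- B replaces A's 256 per-box lens lists (linear label scans per operation) with ONE
-- insertion-ordered dict keyed by label (a box's lens order is the insertion order
-- restricted to that box's labels), scored in a single pass with per-box slot counters.

-- ===== PORT A =====

-- get_chunk_val (same helper in both Python versions)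
def pvHash (cs : List Char) : Int :=
  cs.foldl (fun v c => PySem.Int.mod ((v + (c.toNat : Int)) * 17) 256) 0

-- handle_add_to_box's loop over one box's lens list (replace first matching label, else append)
def pvAddA : List (List Char × Int) → List Char → Int → List (List Char × Int)
  | [], label, fl => [(label, fl)]
  | (l, v) :: rest, label, fl =>
      if l == label then (l, fl) :: rest else (l, v) :: pvAddA rest label fl

-- handle_remove_from_box's loop (remove first matching label)
def pvRemA : List (List Char × Int) → List Char → List (List Char × Int)
  | [], _ => []
  | (l, v) :: rest, label =>
      if l == label then rest else (l, v) :: pvRemA rest label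

-- body of A's per-chunk loop; boxes[box] is ported as getD box [] (the key is always
-- present: 0 ≤ pvHash < 256), and int(...) raising ValueError is the `none` branch,
-- excluded by Pre_part_two
def pvStepA (boxes : PySem.Dict Int (List (List Char × Int))) (chunk : List Char) :
    PySem.Dict Int (List (List Char × Int)) :=
  let splitter : List Char := if PySem.Chars.find chunk ['='] ≠ -1 then ['='] else ['-']
  let label := PySem.List.slice chunk none (some (PySem.Chars.find chunk splitter))
  let box := pvHash label
  if splitter = ['='] then
    match PySem.Int.ofChars? (PySem.List.slice chunk (some (PySem.Chars.find chunk splitter + 1)) none) with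
    | some focal => boxes.insert box (pvAddA (boxes.getD box []) label focal)
    | none => boxes
  else
    boxes.insert box (pvRemA (boxes.getD box []) label)

def part_two (lines : List String) : Int :=
  let boxes0 : PySem.Dict Int (List (List Char × Int)) :=
    (PySem.List.pyRange 0 256).foldl (fun d i => d.insert i []) PySem.Dict.empty
  let boxes := lines.foldl
    (fun bs line => (PySem.Chars.splitOn line.toList [',']).foldl pvStepA bs) boxes0
  boxes.items.foldl
    (fun total p =>
      (PySem.List.enumerate p.2).foldl
        (fun t q => t + (p.1 + 1) * (q.1 + 1) * q.2.2) total) 0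

-- ===== PORT B =====

-- body of B's per-chunk loop: one flat dict label ↦ focal length
-- (int(...) raising ValueError is again the `none` branch, excluded by Pre_part_two)
def pvStepB (d : PySem.Dict (List Char) Int) (chunk : List Char) : PySem.Dict (List Char) Int :=
  let eq := PySem.Chars.find chunk ['=']
  if eq ≠ -1 then
    match PySem.Int.ofChars? (PySem.List.slice chunk (some (eq + 1)) none) with
    | some focal => d.insert (PySem.List.slice chunk none (some eq)) focal
    | none => d
  else
    d.erase (PySem.List.slice chunk none (some (PySem.Chars.find chunk ['-'])))

-- body of B's scoring loop: running total plus a per-box slot counter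
def pvScoreStep (acc : Int × PySem.Dict Int Int) (p : List Char × Int) : Int × PySem.Dict Int Int :=
  let box := pvHash p.1
  let i := acc.2.getD box 0 + 1
  (acc.1 + (box + 1) * i * p.2, acc.2.insert box i)

def part_two_alt (lines : List String) : Int :=
  let lenses := lines.foldl
    (fun d line => (PySem.Chars.splitOn line.toList [',']).foldl pvStepB d) PySem.Dict.empty
  (lenses.items.foldl pvScoreStep (0, PySem.Dict.empty)).1

-- ===== PRECONDITION & SPEC =====
-- Pre_ excludes exactly the inputs where Python's int() raises ValueError (a '='-chunk
-- whose suffix is not an integer literal); both A and B raise there.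
def Pre_part_two (lines : List String) : Prop :=
  ∀ line ∈ lines, ∀ chunk ∈ PySem.Chars.splitOn line.toList [','],
    PySem.Chars.find chunk ['='] ≠ -1 →
    (PySem.Int.ofChars? (PySem.List.slice chunk
        (some (PySem.Chars.find chunk ['='] + 1)) none)).isSome = true
instance (lines : List String) : Decidable (Pre_part_two lines) := by
  unfold Pre_part_two; infer_instance

def pvWitness_part_two : List String := ["rn=1,cm-", "qp=3,cm=2,qp-,pc=4"]

def Spec_part_two (lines : List String) (out : Int) : Prop := out = part_two_alt lines
instance (lines : List String) (out : Int) : Decidable (Spec_part_two lines out) := by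
  unfold Spec_part_two; infer_instance

-- ===== CLAIM (what is proved, stated in full; the proofs are below) =====
def Claim_equal_part_two : Prop :=
  ∀ (lines : List String), Dom_part_two lines → Pre_part_two lines →
    Spec_part_two lines (part_two lines)

-- ===== LEMMAS AND PROOFS =====

-- the lenses of box b inside B's flat dict (entries whose label hashes to b, in order)
def pvBoxList (ds : List (List Char × Int)) (b : Int) : List (List Char × Int) :=
  ds.filter (fun p => pvHash p.1 == b)

-- coupling invariant between A's 256-box dict and B's flat dict
def pvInv (bs : PySem.Dict Int (List (List Char × Int))) (d : PySem.Dict (List Char) Int) : Prop :=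
  bs.items = (PySem.List.pyRange 0 256).map (fun b => (b, pvBoxList d.items b)) ∧
    (d.items.map Prod.fst).Nodup

-- score of one box: Σ (b+1)·(i+1)·focal over its lenses, the index i counting on from i0
def pvS (b : Int) : Int → List (List Char × Int) → Int
  | _, [] => 0
  | i, p :: rest => (b + 1) * (i + 1) * p.2 + pvS b (i + 1) rest

theorem pvRange_nodup : (PySem.List.pyRange 0 256).Nodup := by
  have h : ((256 : Int)) = ((256 : Nat) : Int) := by norm_num
  rw [h, PySem.List.pyRange_zero_natCast]
  exact (List.nodup_range).map (fun a b e => by exact_mod_cast e)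

theorem pvHash_mem (cs : List Char) : 0 ≤ pvHash cs ∧ pvHash cs < 256 := by
  have h : ∀ (l : List Char) (v : Int), 0 ≤ v → v < 256 →
      0 ≤ l.foldl (fun v c => PySem.Int.mod ((v + (c.toNat : Int)) * 17) 256) v ∧
      l.foldl (fun v c => PySem.Int.mod ((v + (c.toNat : Int)) * 17) 256) v < 256 := by
    intro l
    induction l with
    | nil => intro v h1 h2; exact ⟨h1, h2⟩
    | cons c l ih =>
        intro v h1 h2
        simp only [List.foldl_cons]
        exact ih _ (PySem.Int.mod_nonneg _ (by norm_num)) (PySem.Int.mod_lt _ (by norm_num))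
  exact h cs 0 le_rfl (by norm_num)

theorem pvFind?_keyed {α : Type} (ks : List Int) (g : Int → α) (b : Int) (hmem : b ∈ ks) :
    List.find? (fun p => p.1 == b) (ks.map (fun k => (k, g k))) = some (b, g b) := by
  induction ks with
  | nil => simp at hmem
  | cons k ks ih =>
      by_cases hk : k = b
      · subst hk; simp
      · simp only [List.map_cons, List.find?_cons]
        have : ((k, g k).1 == b) = false := by simp [hk]
        rw [this]
        exact ih (List.mem_of_ne_of_mem (fun e => hk e.symm) hmem)

theorem pvSum_shift (R : List Int) (f g : Int → Int) (x c : Int)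
    (hcount : R.count x = 1) (h : ∀ b, b ≠ x → f b = g b) (hx : f x = g x + c) :
    (R.map f).sum = c + (R.map g).sum := by
  induction R with
  | nil => simp at hcount
  | cons a R ih =>
      by_cases ha : a = x
      · subst ha
        have h0 : R.count a = 0 := by simpa [List.count_cons] using hcount
        have hnot : a ∉ R := List.count_eq_zero.mp h0
        have : R.map f = R.map g := List.map_congr_left (fun b hb => h b (fun e => hnot (e ▸ hb)))
        simp [this, hx]; ring
      · have h1 : R.count x = 1 := by simpa [List.count_cons, ha] using hcount
        simp [h a ha, ih h1]; ring

theorem pvMap_id (ds : List (List Char × Int)) (label : List Char) (fl : Int)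
    (h : ∀ q ∈ ds, q.1 ≠ label) :
    ds.map (fun p => if p.1 == label then (label, fl) else p) = ds := by
  calc ds.map (fun p => if p.1 == label then (label, fl) else p)
      = ds.map id := List.map_congr_left (fun q hq => by
          simp [beq_eq_false_iff_ne.mpr (h q hq)])
    _ = ds := List.map_id ds

theorem pvAddA_of_not_mem (L : List (List Char × Int)) (label : List Char) (fl : Int)
    (h : ∀ q ∈ L, q.1 ≠ label) : pvAddA L label fl = L ++ [(label, fl)] := by
  induction L with
  | nil => rfl
  | cons p L ih =>
      cases p with | mk l v =>
      have hp : (l == label) = false := beq_eq_false_iff_ne.mpr (h (l, v) (by simp))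
      simp only [pvAddA, hp, Bool.false_eq_true, if_false, List.cons_append]
      exact congrArg _ (ih (fun q hq => h q (by simp [hq])))

theorem pvIns_box_ne (ds : List (List Char × Int)) (label : List Char) (fl b : Int)
    (hb : b ≠ pvHash label) :
    (ds.map (fun p => if p.1 == label then (label, fl) else p)).filter
        (fun p => pvHash p.1 == b) = pvBoxList ds b := by
  induction ds with
  | nil => rfl
  | cons p ds ih =>
      cases p with | mk l v =>
      by_cases hp : l = label
      · have h2 : (pvHash label == b) = false := beq_eq_false_iff_ne.mpr (fun e => hb e.symm)
        simp only [pvBoxList, List.map_cons, List.filter_cons] at *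
        simpa [hp, h2] using ih
      · have h1 : ((l, v).1 == label) = false := beq_eq_false_iff_ne.mpr hp
        simp only [pvBoxList, List.map_cons, List.filter_cons, h1, Bool.false_eq_true,
          if_false] at *
        cases hpb : (pvHash l == b) <;> simpa [hpb] using ih

theorem pvIns_box_eq (ds : List (List Char × Int)) (label : List Char) (fl : Int)
    (hnd : (ds.map Prod.fst).Nodup) (hany : ds.any (fun p => p.1 == label) = true) :
    (ds.map (fun p => if p.1 == label then (label, fl) else p)).filter
        (fun p => pvHash p.1 == pvHash label)
      = pvAddA (pvBoxList ds (pvHash label)) label fl := by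
  induction ds with
  | nil => simp at hany
  | cons p ds ih =>
      cases p with | mk l v =>
      have hnd' : (ds.map Prod.fst).Nodup := (List.nodup_cons.mp (by simpa using hnd)).2
      by_cases hp : l = label
      · subst hp
        have hnot : l ∉ ds.map Prod.fst := (List.nodup_cons.mp (by simpa using hnd)).1
        have hid := pvMap_id ds l fl (fun q hq e =>
          hnot (e ▸ (List.mem_map_of_mem hq : q.1 ∈ ds.map Prod.fst)))
        simp only [pvBoxList, List.map_cons, List.filter_cons, hid]
        simp [pvAddA]
      · have h1 : (l == label) = false := beq_eq_false_iff_ne.mpr hp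
        have hany' : ds.any (fun p => p.1 == label) = true := by
          simpa [List.any_cons, h1] using hany
        have ihh := ih hnd' hany'
        simp only [pvBoxList, List.map_cons, List.filter_cons, h1, Bool.false_eq_true,
          if_false] at *
        cases hpb : (pvHash l == pvHash label)
        · simpa [hpb] using ihh
        · simpa [hpb, pvAddA, h1, hp] using ihh

theorem pvRemA_box (ds : List (List Char × Int)) (label : List Char)
    (hnd : (ds.map Prod.fst).Nodup) :
    (ds.filter (fun p => !(p.1 == label))).filter (fun p => pvHash p.1 == pvHash label)
      = pvRemA (pvBoxList ds (pvHash label)) label := by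
  induction ds with
  | nil => rfl
  | cons p ds ih =>
      cases p with | mk l v =>
      have hnd' : (ds.map Prod.fst).Nodup := (List.nodup_cons.mp (by simpa using hnd)).2
      by_cases hp : l = label
      · subst hp
        have hnot : l ∉ ds.map Prod.fst := (List.nodup_cons.mp (by simpa using hnd)).1
        have hne : ∀ q ∈ ds, (q.1 == l) = false := fun q hq =>
          beq_eq_false_iff_ne.mpr (fun e : q.1 = l =>
            hnot (e ▸ (List.mem_map_of_mem hq : q.1 ∈ ds.map Prod.fst)))
        simp only [pvBoxList, List.filter_cons, beq_self_eq_true, Bool.not_true,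
          Bool.false_eq_true, if_false, if_true, pvRemA, List.filter_filter]
        exact List.filter_congr (fun q hq => by rw [hne q hq]; simp)
      · have h1 : (l == label) = false := beq_eq_false_iff_ne.mpr hp
        simp only [pvBoxList, List.filter_cons, h1, Bool.not_false, if_true] at *
        cases hpb : (pvHash l == pvHash label)
        · simpa [hpb] using ih hnd'
        · simpa [hpb, pvRemA, h1, hp] using ih hnd'

theorem pvRem_box_ne (ds : List (List Char × Int)) (label : List Char) (b : Int)
    (hb : b ≠ pvHash label) :
    (ds.filter (fun p => !(p.1 == label))).filter (fun p => pvHash p.1 == b)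
      = pvBoxList ds b := by
  induction ds with
  | nil => rfl
  | cons p ds ih =>
      cases p with | mk l v =>
      have hcomb : ∀ (e : List (List Char × Int)),
          (e.filter (fun p => !(p.1 == label))).filter (fun p => pvHash p.1 == b)
            = e.filter (fun a => pvHash a.1 == b && !(a.1 == label)) := by
        intro e; rw [List.filter_filter]
      rw [hcomb] at *
      by_cases hp : l = label
      · have h3 : (pvHash l == b) = false := by
          rw [hp]; exact beq_eq_false_iff_ne.mpr (fun e => hb e.symm)
        simp only [pvBoxList, List.filter_cons, h3, Bool.false_and, Bool.false_eq_true,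
          if_false]
        exact ih
      · have h1 : (l == label) = false := beq_eq_false_iff_ne.mpr hp
        simp only [pvBoxList, List.filter_cons, h1, Bool.not_false, Bool.and_true]
        cases hpb : (pvHash l == b) <;> simp [ih, pvBoxList]

theorem pvIns_box (d : PySem.Dict (List Char) Int) (label : List Char) (fl b : Int)
    (hnd : (d.items.map Prod.fst).Nodup) :
    pvBoxList (d.insert label fl).items b =
      if b = pvHash label then pvAddA (pvBoxList d.items b) label fl
      else pvBoxList d.items b := by
  by_cases hc : d.contains label = true
  · rw [PySem.Dict.items_insert_of_contains d fl hc]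
    have hany : d.items.any (fun p => p.1 == label) = true := hc
    by_cases hb : b = pvHash label
    · subst hb; simp only [if_true, pvBoxList]
      exact pvIns_box_eq d.items label fl hnd hany
    · simp only [hb, if_false, pvBoxList]
      exact pvIns_box_ne d.items label fl b hb
  · have hc' : d.contains label = false := by simpa using hc
    rw [PySem.Dict.items_insert_of_not_contains d fl hc']
    have hall : ∀ q ∈ d.items, q.1 ≠ label := by
      intro q hq he
      have : d.items.any (fun p => p.1 == label) = true :=
        List.any_eq_true.mpr ⟨q, hq, beq_iff_eq.mpr he⟩
      rw [show d.items.any (fun p => p.1 == label) = d.contains label from rfl, hc'] at this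
      exact absurd this (by simp)
    by_cases hb : b = pvHash label
    · subst hb
      simp only [pvBoxList, List.filter_append, if_true]
      rw [pvAddA_of_not_mem _ label fl (fun q hq => hall q (List.mem_of_mem_filter hq))]
      simp
    · simp only [pvBoxList, List.filter_append, hb, if_false]
      have : (pvHash label == b) = false := beq_eq_false_iff_ne.mpr (fun e => hb e.symm)
      simp [this]

theorem pvErase_box (d : PySem.Dict (List Char) Int) (label : List Char) (b : Int)
    (hnd : (d.items.map Prod.fst).Nodup) :
    pvBoxList (d.erase label).items b =
      if b = pvHash label then pvRemA (pvBoxList d.items b) label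
      else pvBoxList d.items b := by
  have he : (d.erase label).items = d.items.filter (fun p => !(p.1 == label)) := rfl
  rw [he]
  by_cases hb : b = pvHash label
  · subst hb; simp only [if_true, pvBoxList]
    exact pvRemA_box d.items label hnd
  · simp only [hb, if_false, pvBoxList]
    exact pvRem_box_ne d.items label b hb

theorem pvIns_nodup (d : PySem.Dict (List Char) Int) (label : List Char) (fl : Int)
    (hnd : (d.items.map Prod.fst).Nodup) :
    ((d.insert label fl).items.map Prod.fst).Nodup := by
  by_cases hc : d.contains label = true
  · rw [PySem.Dict.items_insert_of_contains d fl hc]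
    have : (d.items.map (fun p => if p.1 == label then (label, fl) else p)).map Prod.fst
        = d.items.map Prod.fst := by
      rw [List.map_map]
      apply List.map_congr_left
      intro q hq
      by_cases hq1 : q.1 = label
      · simp [hq1]
      · simp [hq1]
    rw [this]; exact hnd
  · have hc' : d.contains label = false := by simpa using hc
    rw [PySem.Dict.items_insert_of_not_contains d fl hc']
    rw [List.map_append]
    have hnot : label ∉ d.items.map Prod.fst := by
      intro hmem
      rcases List.mem_map.mp hmem with ⟨q, hq, he⟩
      have : d.items.any (fun p => p.1 == label) = true :=
        List.any_eq_true.mpr ⟨q, hq, beq_iff_eq.mpr he⟩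
      rw [show d.items.any (fun p => p.1 == label) = d.contains label from rfl, hc'] at this
      exact absurd this (by simp)
    simp only [List.map_cons, List.map_nil]
    exact List.Nodup.append hnd (List.nodup_singleton label)
      (by intro x hx hy; simp at hy; subst hy; exact hnot hx)

theorem pvErase_nodup (d : PySem.Dict (List Char) Int) (label : List Char)
    (hnd : (d.items.map Prod.fst).Nodup) :
    ((d.erase label).items.map Prod.fst).Nodup := by
  have he : (d.erase label).items = d.items.filter (fun p => !(p.1 == label)) := rfl
  rw [he]
  exact (List.Sublist.map Prod.fst List.filter_sublist).nodup hnd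

-- one update step on both states preserves the invariant
theorem pvInv_insert (bs : PySem.Dict Int (List (List Char × Int)))
    (d d' : PySem.Dict (List Char) Int) (h : Int)
    (f : List (List Char × Int) → List (List Char × Int))
    (hinv : pvInv bs d) (hh : 0 ≤ h ∧ h < 256)
    (hbox : ∀ b, pvBoxList d'.items b =
      if b = h then f (pvBoxList d.items b) else pvBoxList d.items b)
    (hnd' : (d'.items.map Prod.fst).Nodup) :
    pvInv (bs.insert h (f (bs.getD h []))) d' := by
  obtain ⟨hitems, hnd⟩ := hinv
  have hmem : h ∈ PySem.List.pyRange 0 256 := PySem.List.mem_pyRange_one.mpr hh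
  have hget : bs.get? h = some (pvBoxList d.items h) := by
    show (bs.items.find? (fun p => p.1 == h)).map (fun x => x.2) = _
    rw [hitems, pvFind?_keyed (PySem.List.pyRange 0 256) (fun b => pvBoxList d.items b) h hmem]
    rfl
  have hgetD : bs.getD h [] = pvBoxList d.items h := by
    show (bs.get? h).getD [] = _
    rw [hget]; rfl
  have hcont : bs.contains h = true := by
    rw [PySem.Dict.contains_eq_isSome_get?, hget]; rfl
  constructor
  · rw [PySem.Dict.items_insert_of_contains bs _ hcont, hitems, List.map_map]
    apply List.map_congr_left
    intro b _
    by_cases hbh : b = h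
    · subst hbh
      simp only [Function.comp, beq_self_eq_true, if_true, hbox b, hgetD]
    · have : ((b, pvBoxList d.items b).1 == h) = false := beq_eq_false_iff_ne.mpr hbh
      simp only [Function.comp, this, Bool.false_eq_true, if_false, hbox b, hbh]
  · exact hnd'

theorem pvStep_inv (bs : PySem.Dict Int (List (List Char × Int)))
    (d : PySem.Dict (List Char) Int) (chunk : List Char)
    (hpre : PySem.Chars.find chunk ['='] ≠ -1 →
      (PySem.Int.ofChars? (PySem.List.slice chunk
        (some (PySem.Chars.find chunk ['='] + 1)) none)).isSome = true)
    (hinv : pvInv bs d) : pvInv (pvStepA bs chunk) (pvStepB d chunk) := by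
  by_cases hf : PySem.Chars.find chunk ['='] = -1
  · have hA : pvStepA bs chunk =
        bs.insert (pvHash (PySem.List.slice chunk none (some (PySem.Chars.find chunk ['-']))))
          (pvRemA (bs.getD (pvHash (PySem.List.slice chunk none
            (some (PySem.Chars.find chunk ['-'])))) [])
            (PySem.List.slice chunk none (some (PySem.Chars.find chunk ['-'])))) := by
      unfold pvStepA
      simp only [hf]
      norm_num
      exact fun hcontr => absurd hcontr (by decide)
    have hB : pvStepB d chunk =
        d.erase (PySem.List.slice chunk none (some (PySem.Chars.find chunk ['-']))) := by
      unfold pvStepB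
      simp only [hf]
      norm_num
    rw [hA, hB]
    exact pvInv_insert bs d _ _
      (fun L => pvRemA L (PySem.List.slice chunk none (some (PySem.Chars.find chunk ['-']))))
      hinv (pvHash_mem _)
      (fun b => pvErase_box d _ b hinv.2) (pvErase_nodup d _ hinv.2)
  · obtain ⟨fl, hfl⟩ := Option.isSome_iff_exists.mp (hpre hf)
    have hA : pvStepA bs chunk =
        bs.insert (pvHash (PySem.List.slice chunk none (some (PySem.Chars.find chunk ['=']))))
          (pvAddA (bs.getD (pvHash (PySem.List.slice chunk none
            (some (PySem.Chars.find chunk ['='])))) [])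
            (PySem.List.slice chunk none (some (PySem.Chars.find chunk ['=']))) fl) := by
      unfold pvStepA
      simp only [if_pos hf, hfl]
      simp
    have hB : pvStepB d chunk =
        d.insert (PySem.List.slice chunk none (some (PySem.Chars.find chunk ['=']))) fl := by
      unfold pvStepB
      simp only [if_pos hf, hfl]
    rw [hA, hB]
    exact pvInv_insert bs d _ _
      (fun L => pvAddA L (PySem.List.slice chunk none (some (PySem.Chars.find chunk ['=']))) fl)
      hinv (pvHash_mem _)
      (fun b => pvIns_box d _ fl b hinv.2) (pvIns_nodup d _ fl hinv.2)

theorem pvInit_inv :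
    pvInv ((PySem.List.pyRange 0 256).foldl (fun d i => d.insert i []) PySem.Dict.empty)
      PySem.Dict.empty := by
  constructor
  · rw [PySem.Dict.items_foldl_insert_fresh (PySem.List.pyRange 0 256) (fun a => a)
      (fun _ => []) PySem.Dict.empty (fun a _ => by simp) (by simpa using pvRange_nodup)]
    simp [pvBoxList, PySem.Dict.empty]
  · simp [PySem.Dict.empty]

theorem pvA_inner (b : Int) (L : List (List Char × Int)) (t i0 : Int) :
    (PySem.List.enumerate L i0).foldl (fun t q => t + (b + 1) * (q.1 + 1) * q.2.2) t
      = t + pvS b i0 L := by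
  induction L generalizing t i0 with
  | nil => simp [PySem.List.enumerate, pvS]
  | cons p L ih =>
      rw [PySem.List.enumerate_cons, List.foldl_cons, ih]
      simp only [pvS]
      ring

theorem pvA_total (R : List Int) (g : Int → List (List Char × Int)) (t : Int) :
    (R.map (fun b => (b, g b))).foldl
      (fun total p => (PySem.List.enumerate p.2).foldl
        (fun t q => t + (p.1 + 1) * (q.1 + 1) * q.2.2) total) t
      = t + (R.map (fun b => pvS b 0 (g b))).sum := by
  induction R generalizing t with
  | nil => simp
  | cons b R ih =>
      rw [List.map_cons, List.foldl_cons, pvA_inner, ih, List.map_cons, List.sum_cons]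
      ring

theorem pvB_total (ds : List (List Char × Int)) (t : Int) (slot : PySem.Dict Int Int) :
    (ds.foldl pvScoreStep (t, slot)).1
      = t + ((PySem.List.pyRange 0 256).map
          (fun b => pvS b (slot.getD b 0) (pvBoxList ds b))).sum := by
  induction ds generalizing t slot with
  | nil =>
      simp only [List.foldl_nil]
      have h0 : ∀ b ∈ PySem.List.pyRange 0 256,
          pvS b (slot.getD b 0) (pvBoxList [] b) = (fun _ => (0 : Int)) b := by
        intro b _; simp [pvBoxList, pvS]
      rw [List.map_congr_left h0, List.map_const', List.sum_replicate, smul_zero, add_zero]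
  | cons p ds ih =>
      rw [List.foldl_cons, ih]
      have hstep1 : (pvScoreStep (t, slot) p).1
          = t + (pvHash p.1 + 1) * (slot.getD (pvHash p.1) 0 + 1) * p.2 := rfl
      have hstep2 : (pvScoreStep (t, slot) p).2
          = slot.insert (pvHash p.1) (slot.getD (pvHash p.1) 0 + 1) := rfl
      rw [hstep1, hstep2]
      have hcount : (PySem.List.pyRange 0 256).count (pvHash p.1) = 1 :=
        List.count_eq_one_of_mem pvRange_nodup
          (PySem.List.mem_pyRange_one.mpr (pvHash_mem p.1))
      have hsum := pvSum_shift (PySem.List.pyRange 0 256)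
        (fun b => pvS b (slot.getD b 0) (pvBoxList (p :: ds) b))
        (fun b => pvS b ((slot.insert (pvHash p.1) (slot.getD (pvHash p.1) 0 + 1)).getD b 0)
          (pvBoxList ds b))
        (pvHash p.1) ((pvHash p.1 + 1) * (slot.getD (pvHash p.1) 0 + 1) * p.2)
        hcount
        (fun b hb => by
          show pvS b (slot.getD b 0) (pvBoxList (p :: ds) b)
            = pvS b ((slot.insert (pvHash p.1) (slot.getD (pvHash p.1) 0 + 1)).getD b 0)
              (pvBoxList ds b)
          have h1 : (pvHash p.1 == b) = false := beq_eq_false_iff_ne.mpr (fun e => hb e.symm)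
          rw [PySem.Dict.getD_insert]
          simp only [hb, if_false]
          simp [pvBoxList, h1])
        (by
          show pvS (pvHash p.1) (slot.getD (pvHash p.1) 0) (pvBoxList (p :: ds) (pvHash p.1))
            = pvS (pvHash p.1) ((slot.insert (pvHash p.1) (slot.getD (pvHash p.1) 0 + 1)).getD
                (pvHash p.1) 0) (pvBoxList ds (pvHash p.1))
              + (pvHash p.1 + 1) * (slot.getD (pvHash p.1) 0 + 1) * p.2
          rw [PySem.Dict.getD_insert]
          simp only [pvBoxList, List.filter_cons, beq_self_eq_true, if_true, pvS]
          ring)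
      rw [hsum]
      ring

theorem pvFold_inv (cs : List (List Char)) (bs : PySem.Dict Int (List (List Char × Int)))
    (d : PySem.Dict (List Char) Int)
    (hpre : ∀ chunk ∈ cs, PySem.Chars.find chunk ['='] ≠ -1 →
      (PySem.Int.ofChars? (PySem.List.slice chunk
        (some (PySem.Chars.find chunk ['='] + 1)) none)).isSome = true)
    (hinv : pvInv bs d) : pvInv (cs.foldl pvStepA bs) (cs.foldl pvStepB d) := by
  induction cs generalizing bs d with
  | nil => exact hinv
  | cons c cs ih =>
      rw [List.foldl_cons, List.foldl_cons]
      exact ih _ _ (fun chunk hc => hpre chunk (by simp [hc]))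
        (pvStep_inv bs d c (hpre c (by simp)) hinv)

theorem pvLines_inv (lines : List String) (bs : PySem.Dict Int (List (List Char × Int)))
    (d : PySem.Dict (List Char) Int) (hpre : Pre_part_two lines) (hinv : pvInv bs d) :
    pvInv (lines.foldl (fun bs line => (PySem.Chars.splitOn line.toList [',']).foldl pvStepA bs) bs)
      (lines.foldl (fun d line => (PySem.Chars.splitOn line.toList [',']).foldl pvStepB d) d) := by
  induction lines generalizing bs d with
  | nil => exact hinv
  | cons line lines ih =>
      rw [List.foldl_cons, List.foldl_cons]
      exact ih _ _ (fun l hl c hc => hpre l (by simp [hl]) c hc)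
        (pvFold_inv _ bs d (fun c hc => hpre line (by simp) c hc) hinv)

-- ===== VERDICT (by name: the statement is the Claim_ definition above) =====
theorem part_two_spec : Claim_equal_part_two := by
  intro lines hdom hpre
  show part_two lines = part_two_alt lines
  obtain ⟨hitems, hnd⟩ := pvLines_inv lines _ _ hpre pvInit_inv
  show List.foldl
      (fun total p => List.foldl (fun t q => t + (p.1 + 1) * (q.1 + 1) * q.2.2) total
        (PySem.List.enumerate p.2)) 0
      (List.foldl (fun bs line => List.foldl pvStepA bs (PySem.Chars.splitOn line.toList [',']))
        (List.foldl (fun d i => d.insert i []) PySem.Dict.empty (PySem.List.pyRange 0 256))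
        lines).items
    = (List.foldl pvScoreStep (0, PySem.Dict.empty)
        (List.foldl (fun d line => List.foldl pvStepB d (PySem.Chars.splitOn line.toList [',']))
          PySem.Dict.empty lines).items).1
  rw [hitems, pvA_total, pvB_total]
  have h0 : ∀ b ∈ PySem.List.pyRange 0 256,
      pvS b ((PySem.Dict.empty : PySem.Dict Int Int).getD b 0)
        (pvBoxList (List.foldl (fun d line =>
          List.foldl pvStepB d (PySem.Chars.splitOn line.toList [','])) PySem.Dict.empty
          lines).items b)
      = pvS b 0 (pvBoxList (List.foldl (fun d line =>
          List.foldl pvStepB d (PySem.Chars.splitOn line.toList [','])) PySem.Dict.empty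
          lines).items b) := by
    intro b _
    rw [PySem.Dict.getD_empty]
  rw [List.map_congr_left h0]
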